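-- pv_equiv track=rewrite | github.com/pypi-data/pypi-mirror-74 | packages/xlist/xlist-0.0.8.tar.gz/xlist-0.0.8/xlist/index.py | indexes_fst_not_slice
-- ===== SOURCE A (Python) =====
-- def indexes_fst_not_slice(ol,value):
--     length = ol.__len__()
--     begin = None
--     slice = []
--     for i in range(0,length):
--         if(not(ol[i]==value)):
--             begin = i
--             break
--         else:
--             pass
--     if(begin == None):
--         return(None)
--     else:
--         slice.append(begin)
--         for i in range(begin+1,length):
--             if(not(ol[i]==value)):
--                 slice.append(i)
--             else:
--                 break
--     return(slice)
-- ===== SOURCE B (Python) =====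
-- def indexes_fst_not_slice(ol, value):
--     # single full pass with a 3-state machine (0=searching, 1=in run, 2=run ended),
--     # instead of A's two staged break-loops
--     state = 0
--     run = []
--     for i, x in enumerate(ol):
--         if state == 0:
--             if x != value:
--                 state = 1
--                 run = [i]
--         elif state == 1:
--             if x != value:
--                 run.append(i)
--             else:
--                 state = 2
--     return run if state else None
-- ===== Notes on version B (the rewrite author's own statement) =====
-- stated objective: alternative
-- what changed: A makes two staged loops with early break (find the run start, then append until the next match); B makes one full pass over enumerate(ol) with an explicit 3-state machine (searching / in-run / run-ended) accumulating the run, with no break in either phase.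
import Mathlib
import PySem

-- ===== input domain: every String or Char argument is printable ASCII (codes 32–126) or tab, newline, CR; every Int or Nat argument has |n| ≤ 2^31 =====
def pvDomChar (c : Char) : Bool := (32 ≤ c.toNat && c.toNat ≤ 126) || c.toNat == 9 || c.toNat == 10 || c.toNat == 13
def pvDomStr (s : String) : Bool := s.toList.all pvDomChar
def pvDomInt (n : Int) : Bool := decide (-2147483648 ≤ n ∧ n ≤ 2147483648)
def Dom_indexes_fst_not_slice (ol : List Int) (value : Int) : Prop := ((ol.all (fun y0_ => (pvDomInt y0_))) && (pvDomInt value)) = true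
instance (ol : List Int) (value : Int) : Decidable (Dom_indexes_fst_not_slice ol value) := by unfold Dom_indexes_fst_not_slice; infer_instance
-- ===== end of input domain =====

-- B replaces A's two staged break-loops by one full pass with a 3-state machine over enumerate; objective: alternative (same cost).
-- ===== PORT A =====
-- first loop of A: scan indices in order, break at the first i with ol[i] != value
def aScanBegin (ol : List Int) (value : Int) : List Nat → Option Nat
  | [] => none
  | i :: rest => if ¬ (ol.getD i 0 = value) then some i else aScanBegin ol value rest

-- second loop of A: append indices into the accumulator until ol[i] == value (break)
def aCollect (ol : List Int) (value : Int) : List Nat → List Int → List Int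
  | [], acc => acc
  | i :: rest, acc =>
      if ¬ (ol.getD i 0 = value) then aCollect ol value rest (acc ++ [(i : Int)]) else acc

def indexes_fst_not_slice (ol : List Int) (value : Int) : Option (List Int) :=
  match aScanBegin ol value (List.range ol.length) with
  | none => none
  | some b => some (aCollect ol value (List.range' (b + 1) (ol.length - (b + 1))) [(b : Int)])

-- ===== PORT B =====
-- one step of B's state machine: state 0 searches, state 1 collects, state 2 ignores the rest
def bStep (value : Int) (st : Nat × List Int) (p : Int × Int) : Nat × List Int :=
  if st.1 = 0 then (if ¬ (p.2 = value) then (1, [p.1]) else st)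
  else if st.1 = 1 then (if ¬ (p.2 = value) then (1, st.2 ++ [p.1]) else (2, st.2))
  else st

def indexes_fst_not_slice_alt (ol : List Int) (value : Int) : Option (List Int) :=
  let r := (PySem.List.enumerate ol).foldl (bStep value) (0, [])
  if r.1 ≠ 0 then some r.2 else none

-- ===== PRECONDITION & SPEC =====
def Spec_indexes_fst_not_slice (ol : List Int) (value : Int) (out : Option (List Int)) : Prop := out = indexes_fst_not_slice_alt ol value
instance (ol : List Int) (value : Int) (out : Option (List Int)) : Decidable (Spec_indexes_fst_not_slice ol value out) := by unfold Spec_indexes_fst_not_slice; infer_instance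

-- ===== CLAIM =====
def Claim_equal_indexes_fst_not_slice : Prop := ∀ (ol : List Int) (value : Int), Dom_indexes_fst_not_slice ol value → Spec_indexes_fst_not_slice ol value (indexes_fst_not_slice ol value)

-- ===== LEMMAS AND PROOFS =====
-- aScanBegin over the index range starting at s equals findIdx? over the dropped list, shifted by s
lemma aScanBegin_eq (value : Int) (ol : List Int) :
    ∀ (l : List Int) (s : Nat), l = ol.drop s →
      aScanBegin ol value (List.range' s l.length) =
        (l.findIdx? (fun x => x != value)).map (fun k => k + s) := by
  intro l
  induction l with
  | nil => intro s _; simp [aScanBegin]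
  | cons x t ih =>
      intro s hl
      have hget : ol.getD s 0 = x := by
        have : (ol.drop s).getD 0 0 = ol.getD s 0 := by
          simp [List.getD_eq_getElem?_getD]
        rw [← hl] at this; simpa using this.symm
      have ht : t = ol.drop (s + 1) := by
        have := congrArg (List.drop 1) hl
        simpa [List.drop_drop, Nat.add_comm] using this
      have hr : List.range' s (t.length + 1) = s :: List.range' (s + 1) t.length := by
        simp [List.range'_succ]
      simp only [List.length_cons, hr, aScanBegin, hget, List.findIdx?_cons]
      by_cases hx : x = value
      · simp [hx, ih (s + 1) ht, Option.map_map]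
        have hf : (fun k => k + (s + 1)) = (fun k : Nat => k + (1 + s)) := by
          funext k; omega
        rw [hf]
      · simp [hx]

-- aCollect over the index range starting at s appends the indices up to the first match
lemma aCollect_eq (value : Int) (ol : List Int) :
    ∀ (l : List Int) (s : Nat) (acc : List Int), l = ol.drop s →
      aCollect ol value (List.range' s l.length) acc =
        acc ++ (List.range' s ((l.findIdx? (fun x => x == value)).getD l.length)).map
          (fun n => (n : Int)) := by
  intro l
  induction l with
  | nil => intro s acc _; simp [aCollect]
  | cons x t ih =>
      intro s acc hl
      have hget : ol.getD s 0 = x := by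
        have : (ol.drop s).getD 0 0 = ol.getD s 0 := by
          simp [List.getD_eq_getElem?_getD]
        rw [← hl] at this; simpa using this.symm
      have ht : t = ol.drop (s + 1) := by
        have := congrArg (List.drop 1) hl
        simpa [List.drop_drop, Nat.add_comm] using this
      have hr : List.range' s (t.length + 1) = s :: List.range' (s + 1) t.length := by
        simp [List.range'_succ]
      simp only [List.length_cons, hr, aCollect, hget, List.findIdx?_cons]
      by_cases hx : x = value
      · simp [hx]
      · have := ih (s + 1) (acc ++ [(s : Int)]) ht
        simp only [hx, not_false_iff, if_true]
        simp only [beq_iff_eq, hx, if_false] at *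
        simp [this, List.range'_succ]

-- state 2 absorbs everything
lemma bFold_state2 (value : Int) :
    ∀ (l : List (Int × Int)) (run : List Int),
      l.foldl (bStep value) (2, run) = (2, run) := by
  intro l
  induction l with
  | nil => intro run; rfl
  | cons p t ih => intro run; simp [List.foldl_cons, bStep, ih]

-- from state 1, the fold appends indices until the first element equal to value
lemma bFold_state1 (value : Int) :
    ∀ (l : List Int) (s : Nat) (run : List Int),
      (PySem.List.enumerate l (s : Int)).foldl (bStep value) (1, run) =
        ((if (l.findIdx? (fun x => x == value)).isSome then 2 else 1),
          run ++ (List.range' s ((l.findIdx? (fun x => x == value)).getD l.length)).map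
            (fun n => (n : Int))) := by
  intro l
  induction l with
  | nil => intro s run; simp [PySem.List.enumerate_nil]
  | cons x t ih =>
      intro s run
      rw [PySem.List.enumerate_cons, List.foldl_cons]
      by_cases hx : x = value
      · have hstep : bStep value (1, run) ((s : Int), x) = (2, run) := by simp [bStep, hx]
        rw [hstep]
        simp [List.findIdx?_cons, hx, bFold_state2]
      · have hs : ((s : Int) + 1) = ((s + 1 : Nat) : Int) := by push_cast; ring
        have hstep : bStep value (1, run) ((s : Int), x) = (1, run ++ [(s : Int)]) := by
          simp [bStep, hx]
        rw [hstep, hs, ih (s + 1) (run ++ [(s : Int)])]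
        simp [List.findIdx?_cons, hx, List.range'_succ]

-- from state 0, the fold searches for the first mismatch, then behaves as state 1
lemma bFold_state0 (value : Int) :
    ∀ (l : List Int) (s : Nat),
      (PySem.List.enumerate l (s : Int)).foldl (bStep value) (0, []) =
        (match l.findIdx? (fun x => x != value) with
          | none => (0, [])
          | some b =>
              (PySem.List.enumerate (l.drop (b + 1)) ((s + b + 1 : Nat) : Int)).foldl
                (bStep value) (1, [((s + b : Nat) : Int)])) := by
  intro l
  induction l with
  | nil => intro s; simp [PySem.List.enumerate_nil]
  | cons x t ih =>
      intro s
      rw [PySem.List.enumerate_cons, List.foldl_cons]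
      by_cases hx : x = value
      · have hs : ((s : Int) + 1) = ((s + 1 : Nat) : Int) := by push_cast; ring
        have hstep : bStep value (0, []) ((s : Int), x) = (0, []) := by simp [bStep, hx]
        rw [hstep, hs, ih (s + 1)]
        have hb : ((x != value) = true) = False := by simp [hx]
        simp only [List.findIdx?_cons, hb, if_false]
        cases hf : t.findIdx? (fun x => x != value) with
        | none => simp
        | some b =>
            simp only [Option.map_some]
            have h1 : s + 1 + b = s + (b + 1) := by omega
            simp [h1]
      · have hstep : bStep value (0, []) ((s : Int), x) = (1, [(s : Int)]) := by simp [bStep, hx]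
        rw [hstep]
        have hb : ((x != value) = true) = True := by simp [hx]
        simp only [List.findIdx?_cons, hb, if_true, Nat.add_zero, List.drop_succ_cons,
          List.drop_zero, Nat.zero_add]
        rw [show ((s : Int) + 1) = ((s + 1 : Nat) : Int) by push_cast; ring]

-- ===== VERDICT =====
theorem indexes_fst_not_slice_spec : Claim_equal_indexes_fst_not_slice := by
  intro ol value _
  unfold Spec_indexes_fst_not_slice indexes_fst_not_slice indexes_fst_not_slice_alt
  have hscan := aScanBegin_eq value ol ol 0 (by simp)
  rw [List.range_eq_range']
  simp only [Nat.add_zero] at hscan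
  rw [hscan,
    show (PySem.List.enumerate ol : List (Int × Int)) = PySem.List.enumerate ol ((0 : Nat) : Int)
      from rfl,
    bFold_state0 value ol 0]
  cases hfind : List.findIdx? (fun x => x != value) ol with
  | none => rfl
  | some b =>
      simp only [Option.map_some]
      rw [show ((0 + b + 1 : Nat) : Int) = ((b + 1 : Nat) : Int) by push_cast; ring,
        bFold_state1 value (ol.drop (b + 1)) (b + 1) [((0 + b : Nat) : Int)]]
      have hcol := aCollect_eq value ol (ol.drop (b + 1)) (b + 1) [(b : Int)] rfl
      simp only [List.length_drop] at hcol
      rw [hcol]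
      split <;> simp
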